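-- pv_equiv track=rewrite | github.com/pyxis-roc/fuzzing-strata | pattern.py | build_decoder
-- ===== SOURCE A (Python) =====
-- def build_decoder(excluded_range):
--     count = 0
--     out = []
--     for xc in excluded_range:
--         sz = (xc[1] - xc[0] + 1)
--         out.append((count, count + sz, xc[0]))
--         count += sz
--
--     return count, out
-- ===== SOURCE B (Python) =====
-- def build_decoder(excluded_range):
--     # Phase 1: prefix-sum boundary table (n+1 entries)
--     sizes = [hi - lo + 1 for lo, hi in excluded_range]
--     boundaries = [0]
--     for s in sizes:
--         boundaries.append(boundaries[-1] + s)
--     # Phase 2: assemble output from consecutive boundary pairs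
--     out = [(b0, b1, xc[0])
--            for b0, b1, xc in zip(boundaries, boundaries[1:], excluded_range)]
--     return boundaries[-1], out
-- ===== Notes on version B (the rewrite author's own statement) =====
-- stated objective: alternative
-- what changed: Replaces the single running-accumulator pass that appends triples with a two-phase decomposition: first an explicit (n+1)-entry prefix-sum boundary table, then the output assembled by zipping consecutive boundary pairs with the ranges; the count is read off as the table's last entry.
import Mathlib
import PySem

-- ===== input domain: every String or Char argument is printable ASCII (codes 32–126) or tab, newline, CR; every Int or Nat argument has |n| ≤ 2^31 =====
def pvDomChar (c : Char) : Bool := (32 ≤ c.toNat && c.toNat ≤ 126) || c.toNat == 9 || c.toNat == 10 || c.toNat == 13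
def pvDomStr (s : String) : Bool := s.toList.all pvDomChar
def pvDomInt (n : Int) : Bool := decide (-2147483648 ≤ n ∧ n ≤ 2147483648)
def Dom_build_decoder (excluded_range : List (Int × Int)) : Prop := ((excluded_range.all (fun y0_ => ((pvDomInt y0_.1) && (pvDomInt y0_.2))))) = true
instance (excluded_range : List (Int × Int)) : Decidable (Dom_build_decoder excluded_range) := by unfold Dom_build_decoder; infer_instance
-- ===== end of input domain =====

-- B replaces A's single running-accumulator pass by an explicit prefix-sum boundary
-- table assembled with the ranges in a second phase (objective: alternative decomposition).

-- ===== PORT A =====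
-- literal port of A: one pass carrying (count, out), appending a triple per range
def build_decoder (excluded_range : List (Int × Int)) : Int × (List (Int × Int × Int)) :=
  let r := excluded_range.foldl
    (fun (st : Int × List (Int × Int × Int)) xc =>
      let sz := xc.2 - xc.1 + 1
      (st.1 + sz, st.2 ++ [(st.1, st.1 + sz, xc.1)]))
    (0, [])
  (r.1, r.2)

-- ===== PORT B =====
-- B-side helper: the boundary table built by appending prefix sums (boundaries loop in Source B)
def pvBounds (acc : Int) : List Int → List Int
  | [] => [acc]
  | s :: rest => acc :: pvBounds (acc + s) rest

def build_decoder_alt (excluded_range : List (Int × Int)) : Int × (List (Int × Int × Int)) :=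
  let sizes := excluded_range.map (fun xc => xc.2 - xc.1 + 1)
  let boundaries := pvBounds 0 sizes
  let out := ((boundaries.zip boundaries.tail).zip excluded_range).map
    (fun p => (p.1.1, p.1.2, p.2.1))
  (boundaries.getLast!, out)

-- ===== PRECONDITION & SPEC =====
def Spec_build_decoder (excluded_range : List (Int × Int)) (out : Int × (List (Int × Int × Int))) : Prop := out = build_decoder_alt excluded_range
instance (excluded_range : List (Int × Int)) (out : Int × (List (Int × Int × Int))) : Decidable (Spec_build_decoder excluded_range out) := by unfold Spec_build_decoder; infer_instance

-- ===== CLAIM (what is proved, stated in full; the proofs are below) =====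
def Claim_equal_build_decoder : Prop := ∀ (excluded_range : List (Int × Int)), Dom_build_decoder excluded_range → Spec_build_decoder excluded_range (build_decoder excluded_range)

-- ===== LEMMAS AND PROOFS =====

theorem pvBounds_head (acc : Int) (l : List Int) :
    ∃ t, pvBounds acc l = acc :: t := by
  cases l <;> exact ⟨_, rfl⟩

-- the generalized loop invariant: A's fold from state (c, out) equals out ++ B's assembly
-- shifted by c, and ends at the last boundary starting from c
theorem build_decoder_fold (xr : List (Int × Int)) (c : Int) (out : List (Int × Int × Int)) :
    xr.foldl
      (fun (st : Int × List (Int × Int × Int)) xc =>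
        let sz := xc.2 - xc.1 + 1
        (st.1 + sz, st.2 ++ [(st.1, st.1 + sz, xc.1)]))
      (c, out)
    = ((pvBounds c (xr.map (fun xc => xc.2 - xc.1 + 1))).getLast!,
       out ++ (((pvBounds c (xr.map (fun xc => xc.2 - xc.1 + 1))).zip
                (pvBounds c (xr.map (fun xc => xc.2 - xc.1 + 1))).tail).zip xr).map
          (fun p => (p.1.1, p.1.2, p.2.1))) := by
  induction xr generalizing c out with
  | nil => simp [pvBounds, List.getLast!]
  | cons xc rest ih =>
    obtain ⟨t, ht⟩ := pvBounds_head (c + (xc.2 - xc.1 + 1)) (rest.map (fun xc => xc.2 - xc.1 + 1))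
    simp only [List.map_cons, List.foldl_cons, pvBounds, ht]
    rw [ih, ht]
    simp [List.append_assoc]

theorem build_decoder_spec : Claim_equal_build_decoder := by
  intro xr _
  unfold Spec_build_decoder build_decoder build_decoder_alt
  simp only [build_decoder_fold]
  simp
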